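-- pv_equiv track=rewrite | github.com/shuklashreyas/Genetics | app.py | find_pams
-- ===== SOURCE A (Python) =====
-- def find_pams(seq, pam="NGG"):
--     """Return indices where a PAM occurs on + strand.
--        'N' matches any base; PAM index refers to PAM start."""
--     seq = seq.upper()
--     hits = []
--     for i in range(len(seq) - len(pam) + 1):
--         window = seq[i:i+len(pam)]
--         if all(p == 'N' or p == b for p, b in zip(pam, window)):
--             hits.append(i)
--     return hits
-- ===== SOURCE B (Python) =====
-- def find_pams(seq, pam="NGG"):
--     """Return indices where a PAM occurs on + strand.
--        'N' matches any base; PAM index refers to PAM start."""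
--     S = seq.upper()
--     allowed = set(range(len(S) - len(pam) + 1))
--     for j, p in enumerate(pam):
--         if not allowed:
--             break
--         if p != 'N':
--             allowed &= {k - j for k, b in enumerate(S) if b == p}
--     return sorted(allowed)
-- ===== Notes on version B (the rewrite author's own statement) =====
-- stated objective: alternative
-- what changed: Instead of testing each window character-by-character, B computes for each non-wildcard PAM character the set of its occurrence positions in the uppercased sequence shifted by the character's offset, intersects these sets with the set of valid start positions (stopping early once it is empty), and returns them sorted.
import Mathlib
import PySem

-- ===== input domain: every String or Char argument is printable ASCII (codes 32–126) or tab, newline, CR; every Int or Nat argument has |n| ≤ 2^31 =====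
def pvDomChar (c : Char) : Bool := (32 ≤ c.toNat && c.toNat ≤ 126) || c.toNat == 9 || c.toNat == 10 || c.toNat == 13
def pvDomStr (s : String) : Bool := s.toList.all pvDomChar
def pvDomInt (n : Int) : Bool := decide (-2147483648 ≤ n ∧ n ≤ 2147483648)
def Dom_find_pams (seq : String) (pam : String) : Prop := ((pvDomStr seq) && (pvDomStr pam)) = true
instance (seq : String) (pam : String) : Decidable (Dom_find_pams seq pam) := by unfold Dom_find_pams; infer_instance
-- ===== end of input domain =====

-- B replaces A's per-window comparison loop by intersecting, for each non-'N' PAM character,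
-- the set of its (shifted) occurrence positions in the sequence; objective: alternative algorithm.

-- ===== PORT A =====
def find_pams (seq : String) (pam : String) : List Int :=
  let s := PySem.Str.upper seq
  (PySem.List.pyRange 0 (PySem.Str.len s - PySem.Str.len pam + 1) 1).foldl
    (fun hits i =>
      let window := PySem.Str.slice s (some i) (some (i + PySem.Str.len pam))
      if (pam.toList.zip window.toList).all (fun pb => pb.1 == 'N' || pb.1 == pb.2)
      then hits ++ [i] else hits) []

-- ===== PORT B =====
-- B's loop with its early 'break' once the running set is empty
def pvBloop (cs : List Char) : List (Int × Char) → PySem.Set Int → PySem.Set Int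
  | [], allowed => allowed
  | jp :: q, allowed =>
    if allowed = [] then allowed
    else if jp.2 ≠ 'N' then
      pvBloop cs q (PySem.Set.inter allowed
        (PySem.Set.ofList (((PySem.List.enumerate cs).filter
            (fun kb => kb.2 == jp.2)).map (fun kb => kb.1 - jp.1))))
    else pvBloop cs q allowed

def find_pams_alt (seq : String) (pam : String) : List Int :=
  let s := PySem.Str.upper seq
  let allowed0 : PySem.Set Int :=
    PySem.Set.ofList (PySem.List.pyRange 0 (PySem.Str.len s - PySem.Str.len pam + 1) 1)
  let allowed := pvBloop s.toList (PySem.List.enumerate pam.toList) allowed0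
  PySem.List.sorted allowed (fun x => x)

-- ===== PRECONDITION & SPEC =====
def Spec_find_pams (seq : String) (pam : String) (out : List Int) : Prop := out = find_pams_alt seq pam
instance (seq : String) (pam : String) (out : List Int) : Decidable (Spec_find_pams seq pam out) := by unfold Spec_find_pams; infer_instance

-- ===== CLAIM (what is proved, stated in full; the proofs are below) =====
def Claim_equal_find_pams : Prop := ∀ (seq : String) (pam : String), Dom_find_pams seq pam → Spec_find_pams seq pam (find_pams seq pam)

-- ===== LEMMAS AND PROOFS =====

-- occurrence positions of character p in cs, shifted left by j (B's set comprehension)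
def pvOcc (cs : List Char) (j : Int) (p : Char) : List Int :=
  ((PySem.List.enumerate cs).filter (fun kb => kb.2 == p)).map (fun kb => kb.1 - j)

lemma pvMem_enumerate {α : Type} (xs : List α) (s k : Int) (b : α) :
    (k, b) ∈ PySem.List.enumerate xs s ↔
      ∃ t : Nat, t < xs.length ∧ k = s + t ∧ xs[t]? = some b := by
  induction xs generalizing s with
  | nil => simp [PySem.List.enumerate_nil]
  | cons x xsl ih =>
    rw [PySem.List.enumerate_cons]
    simp only [List.mem_cons, ih, Prod.mk.injEq, List.length_cons]
    constructor
    · rintro (⟨hk, hb⟩ | ⟨t, ht, hk, hb⟩)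
      · exact ⟨0, by omega, by omega, by simp [hb]⟩
      · exact ⟨t + 1, by omega, by omega, by simpa using hb⟩
    · rintro ⟨t, ht, hk, hb⟩
      cases t with
      | zero => exact Or.inl ⟨by omega, by simpa using hb.symm⟩
      | succ t => exact Or.inr ⟨t, by omega, by omega, by simpa using hb⟩

lemma pvAll_enumerate {α : Type} (xs : List α) (s : Int) (f : Int × α → Bool) :
    ((PySem.List.enumerate xs s).all f = true) ↔
      ∀ t : Nat, (h : t < xs.length) → f (s + t, xs[t]) = true := by
  rw [List.all_eq_true]
  constructor
  · intro h t ht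
    exact h (s + t, xs[t]) ((pvMem_enumerate xs s (s + t) xs[t]).2
      ⟨t, ht, rfl, by simp [List.getElem?_eq_getElem ht]⟩)
  · rintro h ⟨k, b⟩ hm
    obtain ⟨t, ht, hk, hb⟩ := (pvMem_enumerate xs s k b).1 hm
    have : xs[t] = b := by simpa [List.getElem?_eq_getElem ht] using hb
    subst hk; rw [← this]; exact h t ht

-- B's loop in closed form: each non-'N' step filters the running set; the 'break' only
-- fires on an empty running set, where filtering is a no-op
lemma pvLoopB (cs : List Char) (q : List (Int × Char)) (L : List Int) :
    pvBloop cs q L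
    = L.filter (fun i => q.all (fun jp => jp.2 == 'N' ||
        PySem.Set.contains (PySem.Set.ofList (pvOcc cs jp.1 jp.2)) i)) := by
  induction q generalizing L with
  | nil => simp [pvBloop]
  | cons jp q ih =>
    rw [pvBloop]
    by_cases hL : L = []
    · simp [hL]
    · rw [if_neg hL]
      by_cases hp : jp.2 = 'N'
      · rw [if_neg (by simp [hp]), ih]
        exact List.filter_congr (fun i _ => by simp [hp])
      · rw [if_pos hp, ih]
        show (List.filter _ (PySem.Set.inter L _)) = _
        rw [PySem.Set.inter, List.filter_filter]
        exact List.filter_congr (fun i _ => by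
          simp only [List.all_cons, pvOcc, PySem.Set.contains]
          rw [Bool.and_comm]
          rw [beq_eq_false_iff_ne.mpr hp, Bool.false_or])

-- pointwise agreement of the two tests on in-range start positions
lemma pvMemOcc (cs : List Char) (a t : Nat) (p : Char) (h : a + t < cs.length) :
    ((a : Int) ∈ PySem.Set.ofList (pvOcc cs (t : Int) p)) ↔ cs[a + t] = p := by
  rw [PySem.Set.mem_ofList]
  unfold pvOcc
  simp only [List.mem_map, List.mem_filter]
  constructor
  · rintro ⟨⟨k, b⟩, ⟨hmem, hb⟩, hk⟩
    obtain ⟨u, hu, hk2, hbu⟩ := (pvMem_enumerate cs 0 k b).1 hmem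
    simp only at hk hb
    have hua : u = a + t := by omega
    subst hua
    have hb' : b = p := by simpa using hb
    have hcb : cs[a + t] = b := by simpa [List.getElem?_eq_getElem hu] using hbu
    exact hcb.trans hb'
  · intro hc
    refine ⟨(((a + t : Nat) : Int), p), ⟨?_, by simp⟩, by push_cast; ring⟩
    exact (pvMem_enumerate cs 0 _ _).2 ⟨a + t, h, by push_cast; ring,
      by simp [List.getElem?_eq_getElem h, hc]⟩

lemma pvPoint (cs ps : List Char) (a : Nat)
    (h1 : a + ps.length ≤ cs.length) :
    ((ps.zip (PySem.List.slice cs (some (a : Int)) (some ((a : Int) + (ps.length : Int))))).all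
        (fun pb => pb.1 == 'N' || pb.1 == pb.2))
    = ((PySem.List.enumerate ps).all (fun jp => jp.2 == 'N' ||
        PySem.Set.contains (PySem.Set.ofList (pvOcc cs jp.1 jp.2)) (a : Int))) := by
  rw [PySem.List.slice_natCast_add]
  have hw : ((cs.drop a).take ps.length).length = ps.length := by
    simp; omega
  have hwk : ∀ t (ht : t < ps.length), ((cs.drop a).take ps.length)[t]'(by rw [hw]; exact ht) = cs[a + t]'(by omega) := by
    intro t ht
    simp [List.getElem_take, List.getElem_drop]
  rw [Bool.eq_iff_iff, List.all_eq_true, pvAll_enumerate]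
  constructor
  · intro h t ht
    have hzmem : (ps[t], cs[a + t]'(by omega)) ∈ ps.zip ((cs.drop a).take ps.length) := by
      refine List.mem_iff_getElem.2 ⟨t, by simp [List.length_zip, hw]; omega, ?_⟩
      rw [List.getElem_zip, hwk t ht]
    have hh := h _ hzmem
    simp only [Bool.or_eq_true, beq_iff_eq] at hh
    simp only [Bool.or_eq_true, beq_iff_eq]
    rcases hh with hh | hh
    · exact Or.inl hh
    · refine Or.inr ?_
      rw [PySem.Set.contains_iff]
      have : (0 : Int) + (t : Int) = ((t : Nat) : Int) := by ring
      rw [this]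
      exact (pvMemOcc cs a t ps[t] (by omega)).2 hh.symm
  · intro h x hx
    obtain ⟨k, hk, hget⟩ := List.mem_iff_getElem.1 hx
    have hk' : k < ps.length := by
      simp [List.length_zip, hw] at hk; omega
    have hh := h k hk'
    simp only [Bool.or_eq_true, beq_iff_eq, PySem.Set.contains_iff] at hh
    rw [List.getElem_zip] at hget
    subst hget
    simp only [Bool.or_eq_true, beq_iff_eq]
    rcases hh with hh | hh
    · exact Or.inl hh
    · refine Or.inr ?_
      rw [hwk k hk']
      have : (0 : Int) + (k : Int) = ((k : Nat) : Int) := by ring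
      rw [this] at hh
      exact ((pvMemOcc cs a k ps[k] (by omega)).1 hh).symm

-- closed forms of the two ports
lemma pvAval (seq pam : String) : find_pams seq pam =
    (PySem.List.pyRange 0 (PySem.Str.len (PySem.Str.upper seq) - PySem.Str.len pam + 1) 1).filter
      (fun i => (pam.toList.zip (PySem.Str.slice (PySem.Str.upper seq) (some i)
          (some (i + PySem.Str.len pam))).toList).all
        (fun pb => pb.1 == 'N' || pb.1 == pb.2)) := by
  show (PySem.List.pyRange 0 (PySem.Str.len (PySem.Str.upper seq) - PySem.Str.len pam + 1) 1).foldl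
      (fun hits i => if (pam.toList.zip (PySem.Str.slice (PySem.Str.upper seq) (some i)
          (some (i + PySem.Str.len pam))).toList).all
        (fun pb => pb.1 == 'N' || pb.1 == pb.2) then hits ++ [i] else hits) [] = _
  rw [PySem.List.foldl_append_if_eq_filter]
  simp

lemma pvBval (seq pam : String) : find_pams_alt seq pam =
    PySem.List.sorted
      ((PySem.List.pyRange 0 (PySem.Str.len (PySem.Str.upper seq) - PySem.Str.len pam + 1) 1).filter
        (fun i => (PySem.List.enumerate pam.toList).all (fun jp => jp.2 == 'N' ||
          PySem.Set.contains (PySem.Set.ofList (pvOcc (PySem.Str.upper seq).toList jp.1 jp.2)) i)))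
      (fun x => x) := by
  show PySem.List.sorted
      (pvBloop (PySem.Str.upper seq).toList (PySem.List.enumerate pam.toList)
        (PySem.Set.ofList (PySem.List.pyRange 0
          (PySem.Str.len (PySem.Str.upper seq) - PySem.Str.len pam + 1) 1)))
      (fun x => x) = _
  rw [pvLoopB, PySem.Set.ofList_eq_self_of_nodup _ (PySem.List.nodup_pyRange_one _ _)]

-- ===== VERDICT (by name: the statement is the Claim_ definition above) =====
theorem find_pams_spec : Claim_equal_find_pams := by
  intro seq pam _
  unfold Spec_find_pams
  rw [pvAval, pvBval]
  rw [PySem.List.sorted_eq_self_of_pairwise _ _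
    (((PySem.List.pairwise_lt_pyRange_one _ _).filter _).imp (fun h => le_of_lt h))]
  refine List.filter_congr ?_
  intro i hi
  rw [PySem.List.mem_pyRange_one] at hi
  obtain ⟨a, ha⟩ : ∃ a : Nat, i = (a : Int) := ⟨i.toNat, by omega⟩
  subst ha
  have hlen : a + pam.toList.length ≤ (PySem.Str.upper seq).toList.length := by
    simp only [PySem.Str.len_eq] at hi
    omega
  have := pvPoint (PySem.Str.upper seq).toList pam.toList a hlen
  simpa using this
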